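-- pv_equiv track=rewrite | github.com/MaykolLuisMa/SearchEngine | src/dataset.py | filter_by_occurrence
-- ===== SOURCE A (Python) =====
-- def filter_by_occurrence(data,tags,vocabulary):
--         new_data = []
--         new_tags = []
--         not_founded =[]
--         for i,word in enumerate(data):
--             if word in vocabulary:
--                 new_data.append(word)
--                 new_tags.append(tags[i])
--             else:
--                 not_founded.append(word)
--         return new_data,new_tags ,not_founded
-- ===== SOURCE B (Python) =====
-- def filter_by_occurrence(data, tags, vocabulary):
--     vocab = set(vocabulary)
--     new_data = [w for w in data if w in vocab]
--     new_tags = [tags[i] for i, w in enumerate(data) if w in vocab]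
--     not_founded = [w for w in data if w not in vocab]
--     return new_data, new_tags, not_founded
-- ===== Notes on version B (the rewrite author's own statement) =====
-- stated objective: alternative
-- what changed: Replaces the single indexed loop with three independent comprehension passes (in-vocab words, their tags via enumerate, misses) over a set built from the vocabulary, instead of one loop appending to three accumulators with a linear membership scan.
import Mathlib
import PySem

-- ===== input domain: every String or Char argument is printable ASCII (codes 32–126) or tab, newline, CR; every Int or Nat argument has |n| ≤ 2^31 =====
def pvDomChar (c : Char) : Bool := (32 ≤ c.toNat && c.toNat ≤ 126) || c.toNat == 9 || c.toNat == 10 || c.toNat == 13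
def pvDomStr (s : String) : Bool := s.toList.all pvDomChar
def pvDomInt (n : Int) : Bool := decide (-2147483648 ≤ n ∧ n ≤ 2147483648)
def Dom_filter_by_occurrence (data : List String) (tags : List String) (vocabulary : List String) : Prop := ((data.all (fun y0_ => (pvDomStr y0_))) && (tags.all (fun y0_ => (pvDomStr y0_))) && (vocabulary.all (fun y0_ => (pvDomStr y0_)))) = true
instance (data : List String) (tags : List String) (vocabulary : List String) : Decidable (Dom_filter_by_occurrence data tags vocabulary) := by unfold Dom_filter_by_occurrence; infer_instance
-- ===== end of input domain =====

-- B re-implements A as three independent passes (vocabulary set + comprehensions) instead of one indexed loop with three accumulators; same return value on Pre_ (alternative decomposition, not claimed faster).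

-- ===== PORT A =====
-- one loop over enumerate(data), appending to three accumulator lists;
-- tags[i] is ported with pyGetD (exact under Pre_, which puts every reached index in range)
def filter_by_occurrence (data : List String) (tags : List String) (vocabulary : List String) : List String × List String × List String :=
  (PySem.List.enumerate data 0).foldl
    (fun st p =>
      if p.2 ∈ vocabulary then
        (st.1 ++ [p.2], st.2.1 ++ [PySem.List.pyGetD tags p.1 ""], st.2.2)
      else
        (st.1, st.2.1, st.2.2 ++ [p.2]))
    ([], [], [])

-- ===== PORT B =====
-- three independent passes over data, with the vocabulary turned into a set first;
-- tags[i] is ported with pyGetD (exact under Pre_)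
def filter_by_occurrence_alt (data : List String) (tags : List String) (vocabulary : List String) : List String × List String × List String :=
  let vocab : PySem.Set String := PySem.Set.ofList vocabulary
  (data.filter (fun w => vocab.contains w),
   ((PySem.List.enumerate data 0).filter (fun p => vocab.contains p.2)).map
      (fun p => PySem.List.pyGetD tags p.1 ""),
   data.filter (fun w => !vocab.contains w))

-- ===== PRECONDITION & SPEC =====
-- Pre_ excludes exactly the inputs on which Python A raises IndexError: an in-vocabulary
-- word at index i with i ≥ len(tags) (B raises there too).
def Pre_filter_by_occurrence (data : List String) (tags : List String) (vocabulary : List String) : Prop :=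
  ∀ i < data.length, data.getD i "" ∈ vocabulary → i < tags.length
instance (data : List String) (tags : List String) (vocabulary : List String) : Decidable (Pre_filter_by_occurrence data tags vocabulary) := by unfold Pre_filter_by_occurrence; infer_instance
def pvWitness_filter_by_occurrence : List String × List String × List String := (["a", "b"], ["N", "V"], ["a", "c"])
def Spec_filter_by_occurrence (data : List String) (tags : List String) (vocabulary : List String) (out : List String × List String × List String) : Prop := out = filter_by_occurrence_alt data tags vocabulary
instance (data : List String) (tags : List String) (vocabulary : List String) (out : List String × List String × List String) : Decidable (Spec_filter_by_occurrence data tags vocabulary out) := by unfold Spec_filter_by_occurrence; infer_instance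

-- ===== CLAIM (what is proved, stated in full; the proofs are below) =====
def Claim_equal_filter_by_occurrence : Prop := ∀ (data : List String) (tags : List String) (vocabulary : List String), Dom_filter_by_occurrence data tags vocabulary → Pre_filter_by_occurrence data tags vocabulary → Spec_filter_by_occurrence data tags vocabulary (filter_by_occurrence data tags vocabulary)

-- ===== LEMMAS AND PROOFS =====

-- A's loop, started from arbitrary accumulators and an arbitrary enumerate start,
-- appends exactly B's three passes
theorem loopA_eq (vocabulary tags : List String) (l : List String) (s : Int)
    (a b c : List String) :
    (PySem.List.enumerate l s).foldl
      (fun st p =>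
        if p.2 ∈ vocabulary then
          (st.1 ++ [p.2], st.2.1 ++ [PySem.List.pyGetD tags p.1 ""], st.2.2)
        else
          (st.1, st.2.1, st.2.2 ++ [p.2]))
      (a, b, c)
    = (a ++ l.filter (fun w => decide (w ∈ vocabulary)),
       b ++ ((PySem.List.enumerate l s).filter (fun p => decide (p.2 ∈ vocabulary))).map
              (fun p => PySem.List.pyGetD tags p.1 ""),
       c ++ l.filter (fun w => !decide (w ∈ vocabulary))) := by
  induction l generalizing s a b c with
  | nil => simp [PySem.List.enumerate_nil]
  | cons x xs ih =>
    rw [PySem.List.enumerate_cons]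
    by_cases hx : x ∈ vocabulary <;>
      simp [List.foldl_cons, hx, ih]

-- ===== VERDICT (by name: the statement is the Claim_ definition above) =====
theorem filter_by_occurrence_spec : Claim_equal_filter_by_occurrence := by
  intro data tags vocabulary _ _
  unfold Spec_filter_by_occurrence filter_by_occurrence filter_by_occurrence_alt
  rw [loopA_eq]
  simp
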